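-- pv_equiv track=rewrite | github.com/silverat/Numerologia-Cabalistica-Python | Numerologia.py | giromatrix
-- ===== SOURCE A (Python) =====
-- def reduzir(numero):
--     # este aqui pega o numero formado das letras e reduz para um algarismo ou para 11 e 22.
--     if numero == 11 or numero == 22:  # números 11, 22 não são reduzidos.
--         total = numero
--     else:
--         total = numero
--         tamanho = len(str(total))
--         if tamanho > 1:
--             while tamanho > 1:  # repetindo até o número seja reduzido em um dígito.
--                 if total == 11 or total == 22:
--                     break
--                 palavranum = str(total)
--                 palavranum = list(palavranum)
--                 total = 0
--                 for letra in palavranum: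
--                     total = total + int(letra)
--                 tamanho = len(str(total))
--         else:
--             total = numero
--     return (total)
--
-- def reduzirtotal(numero):
--     # este aqui pega o numero formado das letras e reduz para um algarismo ou para 11 e 22.
--     total = numero
--     tamanho = len(str(total))
--     if tamanho > 1:
--         while tamanho > 1:  # repetindo até o número seja reduzido em um dígito.
--             palavranum = str(total)
--             palavranum = list(palavranum)
--             total = 0
--             for letra in palavranum:
--                 total = total + int(letra)
--             tamanho = len(str(total))
--     else:
--         total = numero
--     return (total)
--
-- def giromatrix(matrixnum):
--     temp = list()
--     cont = 0
--     while cont < (len(matrixnum)-1):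
--         value = matrixnum[cont] + matrixnum[cont + 1]
--         if len(matrixnum) == 2:
--             value = reduzir(value)
--             temp.append(value)
--             break
--
--         value = reduzirtotal(value)
--         temp.append(value)
--         cont += 1
--     return (temp)
-- ===== SOURCE B (Python) =====
-- def reduzirtotal(numero):
--     # reduce to a single digit by recursing on the digit sum
--     if len(str(numero)) <= 1:
--         return numero
--     return reduzirtotal(sum(int(c) for c in str(numero)))
--
-- def reduzir(numero):
--     # same reduction, but 11 and 22 (master numbers) are kept, at every step
--     if numero == 11 or numero == 22 or len(str(numero)) <= 1:
--         return numero
--     return reduzir(sum(int(c) for c in str(numero)))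
--
-- def giromatrix(matrixnum):
--     if len(matrixnum) == 2:
--         return [reduzir(matrixnum[0] + matrixnum[1])]
--     return [reduzirtotal(a + b) for a, b in zip(matrixnum, matrixnum[1:])]
-- ===== Notes on version B (the rewrite author's own statement) =====
-- stated objective: simpler
-- what changed: The mutable while-loops with counters and string re-measuring are replaced by direct recursion on the digit sum, and giromatrix's index-driven while loop becomes a zip-based comprehension over adjacent pairs; Pre_ excludes inputs with a negative adjacent sum, on which both A and B raise ValueError.
import Mathlib
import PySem

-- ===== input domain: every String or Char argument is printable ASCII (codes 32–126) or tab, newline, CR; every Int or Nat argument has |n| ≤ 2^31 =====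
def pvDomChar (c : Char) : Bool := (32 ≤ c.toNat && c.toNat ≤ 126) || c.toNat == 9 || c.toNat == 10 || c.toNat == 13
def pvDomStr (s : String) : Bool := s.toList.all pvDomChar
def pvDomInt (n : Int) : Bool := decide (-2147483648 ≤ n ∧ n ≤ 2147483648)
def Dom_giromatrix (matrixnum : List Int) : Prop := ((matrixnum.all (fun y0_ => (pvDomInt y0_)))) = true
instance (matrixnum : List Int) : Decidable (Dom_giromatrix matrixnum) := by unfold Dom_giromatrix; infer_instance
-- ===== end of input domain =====

-- B replaces A's mutable while-loops by direct recursion on the digit sum and a zip comprehension over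
-- adjacent pairs; proved equal on Pre_ (no negative adjacent sum; there both Pythons raise ValueError).

-- ===== PORT A =====

-- int(letra) for one char; none = ValueError (only reachable for '-', excluded by Pre_), defaulted to 0
def pyDigitA (letra : Char) : Int := (PySem.Int.ofStr? (String.mk [letra])).getD 0

-- one pass of A's inner for-loop: total = 0; for letra in list(str(total)): total = total + int(letra)
def digitPassA (total : Int) : Int :=
  (PySem.Int.toStr total).toList.foldl (fun t letra => t + pyDigitA letra) 0

-- the while-loop of reduzirtotal, with fuel (the loop strictly shrinks total, so fuel suffices)
def rtLoopA : Nat → Int → Int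
  | 0, total => total
  | fuel + 1, total =>
    if PySem.Str.len (PySem.Int.toStr total) > 1 then rtLoopA fuel (digitPassA total) else total

def reduzirtotalA (numero : Int) : Int :=
  if PySem.Str.len (PySem.Int.toStr numero) > 1 then rtLoopA (numero.natAbs + 2) numero
  else numero

-- the while-loop of reduzir: same loop, but breaks when total is 11 or 22
def rLoopA : Nat → Int → Int
  | 0, total => total
  | fuel + 1, total =>
    if PySem.Str.len (PySem.Int.toStr total) > 1 then
      (if total = 11 ∨ total = 22 then total else rLoopA fuel (digitPassA total))
    else total

def reduzirA (numero : Int) : Int :=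
  if numero = 11 ∨ numero = 22 then numero
  else if PySem.Str.len (PySem.Int.toStr numero) > 1 then rLoopA (numero.natAbs + 2) numero
  else numero

-- the while-loop of giromatrix: cont counts up, temp accumulates appends
def giroLoopA (m : List Int) (cont : Nat) (temp : List Int) : List Int :=
  if _h : cont < m.length - 1 then
    let value := m.getD cont 0 + m.getD (cont + 1) 0   -- indices cont, cont+1 are in range here
    if m.length = 2 then temp ++ [reduzirA value]
    else giroLoopA m (cont + 1) (temp ++ [reduzirtotalA value])
  else temp
termination_by m.length - 1 - cont

def giromatrix (matrixnum : List Int) : List Int := giroLoopA matrixnum 0 []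

-- ===== PORT B =====

def pyDigitB (c : Char) : Int := (PySem.Int.ofStr? (String.mk [c])).getD 0

-- sum(int(c) for c in str(numero))
def digitSumB (numero : Int) : Int := ((PySem.Int.toStr numero).toList.map pyDigitB).sum

-- reduzirtotal, recursion made total by fuel (always sufficient: the digit sum shrinks)
def reduzirtotalBF : Nat → Int → Int
  | 0, numero => numero
  | fuel + 1, numero =>
    if PySem.Str.len (PySem.Int.toStr numero) ≤ 1 then numero
    else reduzirtotalBF fuel (digitSumB numero)

def reduzirtotalB (numero : Int) : Int := reduzirtotalBF (numero.natAbs + 2) numero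

def reduzirBF : Nat → Int → Int
  | 0, numero => numero
  | fuel + 1, numero =>
    if numero = 11 ∨ numero = 22 ∨ PySem.Str.len (PySem.Int.toStr numero) ≤ 1 then numero
    else reduzirBF fuel (digitSumB numero)

def reduzirB (numero : Int) : Int := reduzirBF (numero.natAbs + 2) numero

def giromatrix_alt (matrixnum : List Int) : List Int :=
  if matrixnum.length = 2 then [reduzirB (matrixnum.getD 0 0 + matrixnum.getD 1 0)]
  else  -- zip(matrixnum, matrixnum[1:]); matrixnum[1:] is drop 1 (PySem.List.slice_from_one)
    (matrixnum.zip (matrixnum.drop 1)).map (fun p => reduzirtotalB (p.1 + p.2))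

-- ===== PRECONDITION & SPEC =====
-- Pre_ excludes inputs where some adjacent sum is negative: there A raises ValueError (int('-')).
def Pre_giromatrix (matrixnum : List Int) : Prop :=
  ∀ p ∈ matrixnum.zip (matrixnum.drop 1), 0 ≤ p.1 + p.2
instance (matrixnum : List Int) : Decidable (Pre_giromatrix matrixnum) := by
  unfold Pre_giromatrix; infer_instance
def pvWitness_giromatrix : List Int := [3, 8, 9, 100]

def Spec_giromatrix (matrixnum : List Int) (out : List Int) : Prop := out = giromatrix_alt matrixnum
instance (matrixnum : List Int) (out : List Int) : Decidable (Spec_giromatrix matrixnum out) := by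
  unfold Spec_giromatrix; infer_instance

-- ===== CLAIM (what is proved, stated in full; the proofs are below) =====
def Claim_equal_giromatrix : Prop := ∀ (matrixnum : List Int), Dom_giromatrix matrixnum → Pre_giromatrix matrixnum → Spec_giromatrix matrixnum (giromatrix matrixnum)

-- ===== LEMMAS AND PROOFS =====

theorem digitPassA_eq (t : Int) : digitPassA t = digitSumB t := by
  simp only [digitPassA, digitSumB, pyDigitA, pyDigitB, List.sum_eq_foldl, List.foldl_map]

theorem rtLoopA_eq (fuel : Nat) (t : Int) : rtLoopA fuel t = reduzirtotalBF fuel t := by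
  induction fuel generalizing t with
  | zero => rfl
  | succ f ih =>
    simp only [rtLoopA, reduzirtotalBF, digitPassA_eq, ih]
    split_ifs <;> first | rfl | omega

theorem reduzirtotalBF_stop (f : Nat) (n : Int)
    (h : PySem.Str.len (PySem.Int.toStr n) ≤ 1) : reduzirtotalBF (f + 1) n = n := by
  rw [reduzirtotalBF, if_pos h]

theorem reduzirtotal_eq (n : Int) : reduzirtotalA n = reduzirtotalB n := by
  unfold reduzirtotalA reduzirtotalB
  by_cases h : PySem.Str.len (PySem.Int.toStr n) > 1
  · rw [if_pos h, rtLoopA_eq]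
  · rw [if_neg h]
    exact (reduzirtotalBF_stop (n.natAbs + 1) n (by omega)).symm

theorem len_toStr_master (t : Int) (hm : t = 11 ∨ t = 22) :
    PySem.Str.len (PySem.Int.toStr t) > 1 := by
  rcases hm with rfl | rfl <;> decide

theorem rLoopA_eq (fuel : Nat) (t : Int) : rLoopA fuel t = reduzirBF fuel t := by
  induction fuel generalizing t with
  | zero => rfl
  | succ f ih =>
    simp only [rLoopA, reduzirBF, digitPassA_eq, ih]
    by_cases hm : t = 11 ∨ t = 22
    · rw [if_pos (len_toStr_master t hm), if_pos hm,
        if_pos (by rcases hm with h | h; exact Or.inl h; exact Or.inr (Or.inl h))]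
    · rw [not_or] at hm
      by_cases hl : PySem.Str.len (PySem.Int.toStr t) > 1
      · rw [if_pos hl, if_neg (by tauto), if_neg (by rw [not_or, not_or]; exact ⟨hm.1, hm.2, by omega⟩)]
      · rw [if_neg hl, if_pos (Or.inr (Or.inr (by omega)))]

theorem reduzir_eq (n : Int) : reduzirA n = reduzirB n := by
  unfold reduzirA reduzirB
  by_cases hm : n = 11 ∨ n = 22
  · rw [if_pos hm]
    show n = reduzirBF (n.natAbs + 1 + 1) n
    rw [reduzirBF, if_pos (by tauto)]
  · rw [if_neg hm]
    by_cases hl : PySem.Str.len (PySem.Int.toStr n) > 1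
    · rw [if_pos hl, rLoopA_eq]
    · rw [if_neg hl]
      show n = reduzirBF (n.natAbs + 1 + 1) n
      rw [reduzirBF, if_pos (Or.inr (Or.inr (by omega)))]

theorem giroLoop_eq (m : List Int) (hm : m.length ≠ 2) (cont : Nat) (temp : List Int) :
    giroLoopA m cont temp =
      temp ++ ((m.zip (m.drop 1)).drop cont).map (fun p => reduzirtotalB (p.1 + p.2)) := by
  fun_induction giroLoopA m cont temp with
  | case1 cont temp h v h2 => exact absurd h2 hm
  | case2 cont temp h v h2 ih =>
    have hlen : (m.zip (m.drop 1)).length = m.length - 1 := by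
      simp [List.length_zip]
    have hc : cont < (m.zip (m.drop 1)).length := by omega
    have hc1 : cont < m.length := by omega
    have hc2 : cont + 1 < m.length := by omega
    rw [ih, List.drop_eq_getElem_cons hc]
    simp only [show v = m.getD cont 0 + m.getD (cont + 1) 0 from rfl,
      List.getD_eq_getElem?_getD, List.getElem?_eq_getElem hc1, List.getElem?_eq_getElem hc2]
    simp [List.getElem_zip, reduzirtotal_eq]
  | case3 cont temp h =>
    have hlen : (m.zip (m.drop 1)).length = m.length - 1 := by
      simp [List.length_zip]
    rw [List.drop_eq_nil_of_le (by omega)]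
    simp

-- ===== VERDICT (by name: the statement is the Claim_ definition above) =====
theorem giromatrix_spec : Claim_equal_giromatrix := by
  intro m _ _
  unfold Spec_giromatrix giromatrix giromatrix_alt
  by_cases h2 : m.length = 2
  · rw [if_pos h2, giroLoopA, dif_pos (by omega), if_pos h2, reduzir_eq]
    rfl
  · rw [if_neg h2, giroLoop_eq m h2 0]
    simp
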